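-- pv_equiv track=rewrite | github.com/alptugakkoc/Staj | Staj3.py | add_dash_between_even_digits
-- ===== SOURCE A (Python) =====
-- def add_dash_between_even_digits(number_str):
--     result = []
--     prev_even = False
--
--     for digit in number_str:
--         if digit.isdigit():
--             if digit != '0' and int(digit) % 2 == 0:
--                 if prev_even:
--                     result.append('-')
--                 result.append(digit)
--                 prev_even = True
--             else:
--                 result.append(digit)
--                 prev_even = False
--         else:
--             result.append(digit)
--             prev_even = False
--     return ''.join(result)
-- ===== SOURCE B (Python) =====
-- def add_dash_between_even_digits(number_str):
--     # look-ahead pairing instead of a stateful previous-even flag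
--     return ''.join(
--         c + '-' if c in '2468' and n in '2468' else c
--         for c, n in zip(number_str, number_str[1:] + ' ')
--     )
-- ===== Notes on version B (the rewrite author's own statement) =====
-- stated objective: idiomatic
-- what changed: Replaces the stateful loop (prev_even flag, list accumulator, int()-parsing each digit) with a single stateless pass over consecutive character pairs from zip, appending a dash after an even nonzero digit whenever the next character is also one.
import Mathlib
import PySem

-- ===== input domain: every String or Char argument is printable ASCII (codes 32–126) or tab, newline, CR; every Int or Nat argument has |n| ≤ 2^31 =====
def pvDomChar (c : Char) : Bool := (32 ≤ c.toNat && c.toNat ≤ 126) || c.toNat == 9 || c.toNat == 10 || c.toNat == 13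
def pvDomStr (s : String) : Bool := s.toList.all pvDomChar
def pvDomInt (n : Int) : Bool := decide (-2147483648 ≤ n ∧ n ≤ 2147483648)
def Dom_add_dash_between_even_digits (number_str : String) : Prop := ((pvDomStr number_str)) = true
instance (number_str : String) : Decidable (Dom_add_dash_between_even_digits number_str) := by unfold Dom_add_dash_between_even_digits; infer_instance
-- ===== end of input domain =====

-- B replaces A's stateful loop (prev_even flag) with a stateless look-ahead pass over (char, next) pairs; objective: idiomatic.

-- ===== PORT A =====
-- the for loop of A: state = (result list, prev_even); 'int(digit)' via PySem.Int.ofChars?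
-- (getD 0 is unreachable on the ASCII domain: there isdigit ⇒ the char is '0'..'9' and int() succeeds)
def pvALoop : List Char → List (List Char) → Bool → List (List Char)
  | [], result, _ => result
  | c :: rest, result, prev_even =>
    if PySem.Chars.isdigit c then
      if c != '0' && (PySem.Int.mod ((PySem.Int.ofChars? [c]).getD 0) 2 == 0) then
        pvALoop rest ((if prev_even then result ++ [['-']] else result) ++ [[c]]) true
      else
        pvALoop rest (result ++ [[c]]) false
    else
      pvALoop rest (result ++ [[c]]) false

def add_dash_between_even_digits (number_str : String) : String :=
  String.ofList (PySem.Chars.join [] (pvALoop number_str.toList [] false))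

-- ===== PORT B =====
-- 'c in "2468"'
def pvEven (c : Char) : Bool := PySem.Chars.isIn [c] "2468".toList

def pvBPiece (p : Char × Char) : List Char :=
  if pvEven p.1 && pvEven p.2 then [p.1, '-'] else [p.1]

def add_dash_between_even_digits_alt (number_str : String) : String :=
  String.ofList (PySem.Chars.join []
    ((number_str.toList.zip (PySem.Chars.slice number_str.toList (some 1) none ++ [' '])).map pvBPiece))

-- ===== PRECONDITION & SPEC =====
def Spec_add_dash_between_even_digits (number_str : String) (out : String) : Prop := out = add_dash_between_even_digits_alt number_str
instance (number_str : String) (out : String) : Decidable (Spec_add_dash_between_even_digits number_str out) := by unfold Spec_add_dash_between_even_digits; infer_instance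

-- ===== CLAIM (what is proved, stated in full; the proofs are below) =====
def Claim_equal_add_dash_between_even_digits : Prop := ∀ (number_str : String), Dom_add_dash_between_even_digits number_str → Spec_add_dash_between_even_digits number_str (add_dash_between_even_digits number_str)

-- ===== LEMMAS AND PROOFS =====

-- A's per-character "even digit" test
def pvEvenA (c : Char) : Bool :=
  PySem.Chars.isdigit c && (c != '0' && (PySem.Int.mod ((PySem.Int.ofChars? [c]).getD 0) 2 == 0))

lemma pv_join_nil (p : List (List Char)) : PySem.Chars.join [] p = p.flatten := by
  induction p with
  | nil => rfl
  | cons x t ih =>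
      cases t with
      | nil => simp [PySem.Chars.join, List.intercalate]
      | cons y t' =>
          simpa [PySem.Chars.join, List.intercalate, List.intersperse] using
            (by simpa [PySem.Chars.join, List.intercalate] using ih)

-- on the ASCII domain A's test agrees with membership in "2468"
lemma pv_even_eq (c : Char) (h : pvDomChar c = true) : pvEvenA c = pvEven c := by
  have hlt : c.toNat < 128 := by
    unfold pvDomChar at h
    simp only [Bool.or_eq_true, Bool.and_eq_true, decide_eq_true_eq, beq_iff_eq] at h
    omega
  have hall : ∀ n : Fin 128, pvEvenA (Char.ofNat n) = pvEven (Char.ofNat n) := by decide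
  have hc : Char.ofNat c.toNat = c := Char.ofNat_toNat c
  simpa [hc] using hall ⟨c.toNat, hlt⟩

lemma pv_evenA_space : pvEvenA ' ' = false := by decide

lemma pv_zip_cons (c : Char) (rest : List Char) :
    (c :: rest).zip (rest ++ [' ']) = (c, rest.headD ' ') :: rest.zip (rest.drop 1 ++ [' ']) := by
  cases rest <;> simp

lemma pv_main (cs : List Char) (res : List (List Char)) (prev : Bool)
    (h : ∀ c ∈ cs, pvDomChar c = true) :
    (pvALoop cs res prev).flatten
      = res.flatten ++ (if prev && pvEvenA (cs.headD ' ') then ['-'] else [])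
        ++ ((cs.zip (cs.drop 1 ++ [' '])).map pvBPiece).flatten := by
  induction cs generalizing res prev with
  | nil => simp [pvALoop, pv_evenA_space]
  | cons c rest ih =>
      have hc : pvDomChar c = true := h c (by simp)
      have hrest : ∀ x ∈ rest, pvDomChar x = true := fun x hx => h x (by simp [hx])
      have hbp : pvBPiece (c, rest.headD ' ') =
          if pvEvenA c && pvEvenA (rest.headD ' ') then [c, '-'] else [c] := by
        have h1 : pvEvenA c = pvEven c := pv_even_eq c hc
        have h2 : pvEvenA (rest.headD ' ') = pvEven (rest.headD ' ') := by
          cases hr : rest with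
          | nil => simpa using pv_evenA_space
          | cons y t => exact pv_even_eq y (hrest y (by simp [hr]))
        simp only [pvBPiece]
        rw [← h1, ← h2]
      rw [List.drop_one, List.tail_cons, pv_zip_cons, List.map_cons, List.flatten_cons, hbp]
      cases hA : pvEvenA c with
      | false =>
          have hstep : pvALoop (c :: rest) res prev = pvALoop rest (res ++ [[c]]) false := by
            unfold pvEvenA at hA
            cases hd : PySem.Chars.isdigit c with
            | false => simp [pvALoop, hd]
            | true =>
                simp only [hd, Bool.true_and] at hA
                simp only [pvALoop, hd, hA, Bool.false_eq_true, if_false, if_true]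
          rw [hstep, ih _ _ hrest]
          simp [hA]
      | true =>
          have hstep : pvALoop (c :: rest) res prev
              = pvALoop rest ((if prev then res ++ [['-']] else res) ++ [[c]]) true := by
            unfold pvEvenA at hA
            simp only [Bool.and_eq_true] at hA
            simp only [pvALoop, hA.1, hA.2.1, hA.2.2, Bool.and_self, if_true]
          rw [hstep, ih _ _ hrest]
          rcases prev with _ | _ <;> rcases hh : pvEvenA (rest.headD ' ') with _ | _ <;>
            simp [hA, hh]

-- ===== VERDICT (by name: the statement is the Claim_ definition above) =====
theorem add_dash_between_even_digits_spec : Claim_equal_add_dash_between_even_digits := by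
  intro s hdom
  unfold Spec_add_dash_between_even_digits add_dash_between_even_digits add_dash_between_even_digits_alt
  have hall : ∀ c ∈ s.toList, pvDomChar c = true := by
    unfold Dom_add_dash_between_even_digits pvDomStr at hdom
    simpa [List.all_eq_true] using hdom
  have hslice : PySem.Chars.slice s.toList (some 1) none = s.toList.drop 1 := by
    simp [pysem]
  rw [pv_join_nil, pv_join_nil, hslice, pv_main s.toList [] false hall]
  simp
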